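-- pv_equiv track=rewrite | github.com/CodeMario/Algorithm | 프로그래머스/2/87390. n＾2 배열 자르기/n＾2 배열 자르기.py | solution
-- ===== SOURCE A (Python) =====
-- def solution(n, left, right):
--     answer = []
--     lr = left//n
--     lc = left%n
--     rr = right//n
--     rc = right%n
--
--     for i in range(lr,rr+1) :
--         temp = []
--         answer += [i+1]*(i+1)
--         for j in range(i+1,n) :
--             temp += [j+1]
--         answer += temp
--
--     answer = answer[lc:(rr-lr)*n+rc+1]
--     return answer
-- ===== SOURCE B (Python) =====
-- def solution(n, left, right):
--     return [max(i // n, i % n) + 1 for i in range(left, right + 1)]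
-- ===== Notes on version B (the rewrite author's own statement) =====
-- stated objective: alternative
-- what changed: B computes each requested entry directly by the closed form max(i//n, i%n)+1 for flat index i in [left, right], instead of materialising all rows from row left//n to row right//n and slicing; it touches only the requested window (a timing run found no speedup at the largest generated size).
-- outside the precondition, e.g. on solution(0, 1, 2): A raises ZeroDivisionError, B raises ZeroDivisionError; on solution(-2, 0, 1): A returns [], B returns [1, 0]; on solution(2, -3, 1): A returns [1, 2, 1, 2, 1], B returns [2, 1, 2, 1, 2]
import Mathlib
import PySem

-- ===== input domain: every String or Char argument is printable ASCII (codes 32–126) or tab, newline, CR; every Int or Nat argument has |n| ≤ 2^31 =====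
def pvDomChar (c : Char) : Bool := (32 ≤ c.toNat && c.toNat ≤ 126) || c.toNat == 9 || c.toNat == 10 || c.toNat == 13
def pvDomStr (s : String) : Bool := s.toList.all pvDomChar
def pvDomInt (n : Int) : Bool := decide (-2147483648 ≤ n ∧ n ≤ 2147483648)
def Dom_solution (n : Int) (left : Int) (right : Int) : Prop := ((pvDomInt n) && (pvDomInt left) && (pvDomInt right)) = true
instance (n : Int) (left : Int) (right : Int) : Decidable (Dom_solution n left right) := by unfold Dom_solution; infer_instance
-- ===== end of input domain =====

-- B replaces A's row-by-row construction + slice by the closed form max(i//n, i%n)+1 per requested flat index (a per-index formula instead of building and slicing rows).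


-- ===== PORT A =====
def solution (n : Int) (left : Int) (right : Int) : List Int :=
  let lr := PySem.Int.floordiv left n
  let lc := PySem.Int.mod left n
  let rr := PySem.Int.floordiv right n
  let rc := PySem.Int.mod right n
  let answer := (PySem.List.pyRange lr (rr + 1) 1).foldl (fun answer i =>
      let temp := (PySem.List.pyRange (i + 1) n 1).foldl (fun temp j => temp ++ [j + 1]) []
      (answer ++ PySem.List.pyRepeat [i + 1] (i + 1)) ++ temp) []
  PySem.List.slice answer (some lc) (some ((rr - lr) * n + rc + 1))

-- ===== PORT B =====
def solution_alt (n : Int) (left : Int) (right : Int) : List Int :=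
  (PySem.List.pyRange left (right + 1) 1).map
    (fun i => max (PySem.Int.floordiv i n) (PySem.Int.mod i n) + 1)

-- ===== PRECONDITION & SPEC =====
-- Pre_ excludes n = 0, where A raises ZeroDivisionError, and restricts to the task's natural domain
-- of an n×n array queried by flat indices (n ≥ 1, a window not starting below flat index -n nor ending
-- at or beyond n²+n): outside it the values A returns (e.g. [] for negative n, shifted or truncated
-- slices for far-out-of-range windows) are accidents of its slice arithmetic that no caller of the
-- n²-array function is specified to get; empty windows (right < left) are kept for any left/right.
def Pre_solution (n : Int) (left : Int) (right : Int) : Prop :=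
  1 ≤ n ∧ (right < left ∨ (-n ≤ left ∧ right < n * n + n))
instance (n : Int) (left : Int) (right : Int) : Decidable (Pre_solution n left right) := by
  unfold Pre_solution; infer_instance
def pvWitness_solution : Int × Int × Int := (3, 2, 5)

def Spec_solution (n : Int) (left : Int) (right : Int) (out : List Int) : Prop :=
  out = solution_alt n left right
instance (n : Int) (left : Int) (right : Int) (out : List Int) : Decidable (Spec_solution n left right out) := by
  unfold Spec_solution; infer_instance

-- ===== CLAIM (what is proved, stated in full; the proofs are below) =====
def Claim_equal_solution : Prop := ∀ (n : Int) (left : Int) (right : Int), Dom_solution n left right → Pre_solution n left right → Spec_solution n left right (solution n left right)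

-- ===== LEMMAS AND PROOFS =====

-- floor-division/mod of an in-row flat index
theorem pv_fm (n i k : Int) (hn : 0 < n) (h0 : 0 ≤ k) (hk : k < n) :
    PySem.Int.floordiv (i * n + k) n = i ∧ PySem.Int.mod (i * n + k) n = k := by
  have hd : PySem.Int.floordiv (i * n + k) n = i := by
    rw [PySem.Int.floordiv_eq_iff_of_pos hn]
    constructor <;> nlinarith
  refine ⟨hd, ?_⟩
  have := PySem.Int.floordiv_mul_add_mod (i * n + k) n
  rw [hd] at this; linarith

-- one row of A (replicate part ++ tail part) is the closed form over its flat index range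
theorem pv_row (n i : Int) (hn : 1 ≤ n) (h0 : -1 ≤ i) (hi : i < n) :
    PySem.List.pyRepeat [i + 1] (i + 1) ++ (PySem.List.pyRange (i + 1) n 1).map (fun j => j + 1)
      = (PySem.List.pyRange (i * n) (i * n + n) 1).map
          (fun idx => max (PySem.Int.floordiv idx n) (PySem.Int.mod idx n) + 1) := by
  have hpos : (0 : Int) < n := by omega
  rw [PySem.List.pyRepeat_singleton]
  apply List.ext_getElem
  · simp [PySem.List.length_pyRange_one]; omega
  · intro k h1 h2
    rw [List.getElem_map, PySem.List.getElem_pyRange_one]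
    have hkn : (k : Int) < n := by
      rw [List.length_map, PySem.List.length_pyRange_one] at h2; omega
    obtain ⟨hd, hm⟩ := pv_fm n i (k : Int) hpos (by positivity) hkn
    by_cases hk : k < (i + 1).toNat
    · rw [List.getElem_append_left (by simpa using hk), List.getElem_replicate]
      simp only [hd, hm]
      have : (k : Int) ≤ i := by omega
      omega
    · rw [List.getElem_append_right (by simpa using hk), List.getElem_map,
          PySem.List.getElem_pyRange_one]
      simp only [hd, hm, List.length_replicate]
      have : i + 1 ≤ (k : Int) := by omega
      omega

-- beyond the last row (flat indices in [n², n²+n)) the closed form is constantly n+1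
theorem pv_const (n a b : Int) (hn : 1 ≤ n) (ha : n * n ≤ a) (hb : b ≤ n * n + n) :
    (PySem.List.pyRange a b 1).map
        (fun idx => max (PySem.Int.floordiv idx n) (PySem.Int.mod idx n) + 1)
      = List.replicate (b - a).toNat (n + 1) := by
  have hpos : (0 : Int) < n := by omega
  apply List.ext_getElem
  · simp [PySem.List.length_pyRange_one]
  · intro k h1 h2
    rw [List.getElem_map, PySem.List.getElem_pyRange_one, List.getElem_replicate]
    have hkb : a + (k : Int) < b := by
      rw [List.length_map, PySem.List.length_pyRange_one] at h1; omega
    obtain ⟨hd, hm⟩ := pv_fm n n (a + (k : Int) - n * n) hpos (by omega) (by omega)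
    rw [show a + (k : Int) = n * n + (a + (k : Int) - n * n) by ring]
    simp only [hd, hm]
    omega

-- concatenating the per-row closed forms over rows a..b-1 is the closed form over flat indices a*n..b*n-1
theorem pv_concat (n : Int) (hn : 1 ≤ n) (f : Int → Int) :
    ∀ (m : Nat) (a b : Int), a ≤ b → (b - a).toNat = m →
      (PySem.List.pyRange a b 1).flatMap (fun i => (PySem.List.pyRange (i * n) (i * n + n) 1).map f)
        = (PySem.List.pyRange (a * n) (b * n) 1).map f := by
  intro m
  induction m with
  | zero =>
    intro a b hab hm
    have : a = b := by omega
    subst this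
    simp [PySem.List.pyRange_one_eq_nil le_rfl]
  | succ m ih =>
    intro a b hab hm
    have hlt : a < b := by omega
    rw [PySem.List.pyRange_one_cons hlt, List.flatMap_cons,
        ih (a + 1) b (by omega) (by omega)]
    have h1 : a * n ≤ a * n + n := by omega
    have h2 : a * n + n ≤ b * n := by nlinarith
    rw [PySem.List.pyRange_one_append (a * n) (a * n + n) (b * n) h1 h2, List.map_append]
    congr 2
    ring_nf

-- a [a-s : b-s] slice of the closed-form map over flat indices [s, e) is the map over [a, b)
theorem pv_slice_map (f : Int → Int) (s e a b : Int) (hs : s ≤ a) (hab : a ≤ b) (hbe : b ≤ e) :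
    PySem.List.slice ((PySem.List.pyRange s e 1).map f) (some (a - s)) (some (b - s))
      = (PySem.List.pyRange a b 1).map f := by
  rw [PySem.List.slice_toNat _ (by omega) (by omega),
      PySem.List.pyRange_one_append s a e (by omega) (by omega),
      PySem.List.pyRange_one_append a b e hab hbe,
      List.map_append, List.map_append]
  have h1 : ((PySem.List.pyRange s a 1).map f).length = (a - s).toNat := by
    rw [List.length_map, PySem.List.length_pyRange_one]
  have h2 : ((PySem.List.pyRange a b 1).map f).length = (b - s).toNat - (a - s).toNat := by
    rw [List.length_map, PySem.List.length_pyRange_one]; omega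
  rw [← h2, ← h1, List.drop_left, List.take_left]

-- ===== VERDICT (by name: the statement is the Claim_ definition above) =====
theorem solution_spec : Claim_equal_solution := by
  intro n left right _ hpre
  unfold Pre_solution at hpre
  obtain ⟨hn, hpre⟩ := hpre
  unfold Spec_solution solution solution_alt
  dsimp only
  have hpos : (0 : Int) < n := by omega
  set f : Int → Int := fun idx => max (PySem.Int.floordiv idx n) (PySem.Int.mod idx n) + 1 with hf
  set lr := PySem.Int.floordiv left n with hlrdef
  set lc := PySem.Int.mod left n with hlcdef
  set rr := PySem.Int.floordiv right n with hrrdef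
  set rc := PySem.Int.mod right n with hrcdef
  have hleft : lr * n + lc = left := PySem.Int.floordiv_mul_add_mod left n
  have hright : rr * n + rc = right := PySem.Int.floordiv_mul_add_mod right n
  have hlc0 : 0 ≤ lc := PySem.Int.mod_nonneg left hpos
  have hlcn : lc < n := PySem.Int.mod_lt left hpos
  have hrc0 : 0 ≤ rc := PySem.Int.mod_nonneg right hpos
  have hrcn : rc < n := PySem.Int.mod_lt right hpos
  by_cases hord : left ≤ right
  case neg =>
    -- empty query window (right < left): A's slice is empty, B's range is empty
    rw [PySem.List.pyRange_one_eq_nil (show right + 1 ≤ left by omega), List.map_nil]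
    by_cases hc : lr ≤ rr
    · have hE0 : 0 ≤ (rr - lr) * n + rc + 1 := by nlinarith
      have hElc : (rr - lr) * n + rc + 1 ≤ lc := by nlinarith
      rw [PySem.List.slice_toNat _ hlc0 hE0,
          show ((rr - lr) * n + rc + 1).toNat - lc.toNat = 0 by omega,
          List.take_zero]
    · rw [show PySem.List.pyRange lr (rr + 1) 1 = [] from
          PySem.List.pyRange_one_eq_nil (by omega)]
      simp [PySem.List.slice]
  case pos =>
    obtain ⟨hl, hr⟩ : -n ≤ left ∧ right < n * n + n := by
      rcases hpre with h | h
      · omega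
      · exact h
    have hlr0 : -1 ≤ lr := by nlinarith
    have hrrn : rr ≤ n := by nlinarith
    have hlrrr : lr ≤ rr := by nlinarith
    have ha : lc = left - lr * n := by omega
    have hb : (rr - lr) * n + rc + 1 = (right + 1) - lr * n := by linear_combination hright
    -- the inner loop builds the row tail; inline it and rewrite each in-array row to the closed-form map
    have hbody : ∀ (acc : List Int) (i : Int), i ∈ PySem.List.pyRange lr (min rr (n - 1) + 1) 1 →
        ((acc ++ PySem.List.pyRepeat [i + 1] (i + 1)) ++
          (PySem.List.pyRange (i + 1) n 1).foldl (fun temp j => temp ++ [j + 1]) [])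
          = acc ++ (PySem.List.pyRange (i * n) (i * n + n) 1).map f := by
      intro acc i hi
      obtain ⟨hi1, hi2⟩ := (PySem.List.mem_pyRange_one).mp hi
      have hmin : i ≤ n - 1 := le_trans (by omega) (min_le_right rr (n - 1))
      rw [PySem.List.foldl_append_singleton_eq_map, List.nil_append, List.append_assoc,
          pv_row n i hn (by omega) (by omega)]
    by_cases hcase : rr < n
    · -- all rows lie inside the array
      have hmin : min rr (n - 1) = rr := by omega
      rw [hmin] at hbody
      have hfold := PySem.List.foldl_congr_mem (PySem.List.pyRange lr (rr + 1) 1)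
        (fun answer i => (answer ++ PySem.List.pyRepeat [i + 1] (i + 1)) ++
            (PySem.List.pyRange (i + 1) n 1).foldl (fun temp j => temp ++ [j + 1]) [])
        (fun acc i => acc ++ (PySem.List.pyRange (i * n) (i * n + n) 1).map f)
        ([] : List Int) hbody
      rw [hfold,
          PySem.List.foldl_append_eq_flatMap, List.nil_append,
          pv_concat n hn f (rr + 1 - lr).toNat lr (rr + 1) (by omega) rfl,
          ha, hb]
      exact pv_slice_map f (lr * n) ((rr + 1) * n) left (right + 1)
        (by nlinarith) (by omega) (by nlinarith)
    · -- the last requested row is row n, just past the array; A built it as (n+1) copies of n+1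
      have hrr : rr = n := by omega
      have hmin : min rr (n - 1) = n - 1 := by omega
      rw [hmin, show n - 1 + 1 = n by ring] at hbody
      rw [hrr, PySem.List.pyRange_one_succ_right (show lr ≤ n by omega), List.foldl_append]
      have hfold := PySem.List.foldl_congr_mem (PySem.List.pyRange lr n 1)
        (fun answer i => (answer ++ PySem.List.pyRepeat [i + 1] (i + 1)) ++
            (PySem.List.pyRange (i + 1) n 1).foldl (fun temp j => temp ++ [j + 1]) [])
        (fun acc i => acc ++ (PySem.List.pyRange (i * n) (i * n + n) 1).map f)
        ([] : List Int) hbody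
      rw [hfold, PySem.List.foldl_append_eq_flatMap, List.nil_append,
          pv_concat n hn f (n - lr).toNat lr n (by omega) rfl]
      -- the single fold step for row n
      rw [List.foldl_cons, List.foldl_nil,
          PySem.List.pyRange_one_eq_nil (show n ≤ n + 1 by omega)]
      simp only [List.foldl_nil, List.append_nil, PySem.List.pyRepeat_singleton]
      -- now: slice (map f [lr*n, n²) ++ replicate (n+1) (n+1)) [lc : E] = map f [left, right+1)
      have hb' : (n - lr) * n + rc + 1 = right + 1 - lr * n := by
        linear_combination hb - n * hrr
      have hprod : (n - lr) * n = n * n - lr * n := by ring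
      have hE0 : 0 ≤ (n - lr) * n + rc + 1 := by nlinarith
      rw [PySem.List.slice_toNat _ hlc0 hE0]
      have hEtn : ((n - lr) * n + rc + 1).toNat - lc.toNat = (right + 1 - left).toNat := by
        omega
      rw [hEtn]
      have hXlen : ((PySem.List.pyRange (lr * n) (n * n) 1).map f).length = (n * n - lr * n).toNat := by
        rw [List.length_map, PySem.List.length_pyRange_one]
      by_cases hsingle : n * n ≤ left
      · -- the whole window lies in row n: the map part is dropped entirely
        have hlrn : lr = n := by nlinarith
        have hln : lr * n = n * n := by rw [hlrn]
        rw [hlrn, PySem.List.pyRange_one_eq_nil (le_refl (n * n)), List.map_nil, List.nil_append,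
            List.drop_replicate, List.take_replicate,
            pv_const n left (right + 1) hn hsingle (by omega)]
        congr 1
        omega
      · -- the window starts inside the array and ends in row n
        rw [Int.not_le] at hsingle
        rw [List.drop_append_of_le_length (by rw [hXlen]; omega)]
        have hdropX : ((PySem.List.pyRange (lr * n) (n * n) 1).map f).drop lc.toNat
            = (PySem.List.pyRange left (n * n) 1).map f := by
          rw [PySem.List.pyRange_one_append (lr * n) left (n * n) (by nlinarith) (by omega),
              List.map_append,
              show lc.toNat = ((PySem.List.pyRange (lr * n) left 1).map f).length by
                rw [List.length_map, PySem.List.length_pyRange_one]; omega,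
              List.drop_left]
        rw [hdropX,
            PySem.List.pyRange_one_append left (n * n) (right + 1) (by omega) (by omega),
            List.map_append,
            pv_const n (n * n) (right + 1) hn (le_refl _) (by omega)]
        have hYlen : ((PySem.List.pyRange left (n * n) 1).map f).length = (n * n - left).toNat := by
          rw [List.length_map, PySem.List.length_pyRange_one]
        rw [List.take_append, List.take_of_length_le (by rw [hYlen]; omega),
            List.take_replicate, hYlen]
        congr 2
        omega
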